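-- pv_equiv track=rewrite | github.com/SimaLeibman/WordleSolver | RandomBullshit.py | find_contained_pattern_pairs_fast
-- ===== SOURCE A (Python) =====
-- def build_pattern_sets(words, pattern_freq_db):
--     """
--     Precompute pattern sets for efficiency.
--     """
--     return {
--         word: set(pattern_freq_db[word].keys())
--         for word in words
--     }
--
-- def find_contained_pattern_pairs_fast(words, pattern_freq_db):
--     """
--     Efficient containment detection.
--     """
--
--     pattern_sets = build_pattern_sets(words, pattern_freq_db)
--     results = []
--
--     for a in words:
--         set_a = pattern_sets[a]
--         for b in words:
--             if a == b:
--                 continue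
--             if set_a.issubset(pattern_sets[b]):
--                 results.append((a, b))
--
--     return results
-- ===== SOURCE B (Python) =====
-- def find_contained_pattern_pairs_fast(words, pattern_freq_db):
--     """
--     Inverted-index containment detection: intersect posting lists instead of
--     per-pair issubset scans.
--     """
--     pattern_sets = {word: set(pattern_freq_db[word].keys()) for word in words}
--     all_words = set(words)
--
--     # inverted index: pattern -> set of words whose pattern set contains it
--     index = {}
--     for w in words:
--         for p in pattern_sets[w]:
--             index.setdefault(p, set()).add(w)
--
--     results = []
--     for a in words:
--         candidates = all_words
--         for p in pattern_sets[a]: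
--             candidates = candidates & index.get(p, set())
--         for b in words:
--             if b != a and b in candidates:
--                 results.append((a, b))
--     return results
-- ===== Notes on version B (the rewrite author's own statement) =====
-- stated objective: alternative
-- what changed: Replaces the per-pair issubset check of the all-pairs double loop by an inverted index from pattern to the set of words containing it; each word's container candidates are computed by intersecting posting lists, then pairs are emitted in the original words order.
import Mathlib
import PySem

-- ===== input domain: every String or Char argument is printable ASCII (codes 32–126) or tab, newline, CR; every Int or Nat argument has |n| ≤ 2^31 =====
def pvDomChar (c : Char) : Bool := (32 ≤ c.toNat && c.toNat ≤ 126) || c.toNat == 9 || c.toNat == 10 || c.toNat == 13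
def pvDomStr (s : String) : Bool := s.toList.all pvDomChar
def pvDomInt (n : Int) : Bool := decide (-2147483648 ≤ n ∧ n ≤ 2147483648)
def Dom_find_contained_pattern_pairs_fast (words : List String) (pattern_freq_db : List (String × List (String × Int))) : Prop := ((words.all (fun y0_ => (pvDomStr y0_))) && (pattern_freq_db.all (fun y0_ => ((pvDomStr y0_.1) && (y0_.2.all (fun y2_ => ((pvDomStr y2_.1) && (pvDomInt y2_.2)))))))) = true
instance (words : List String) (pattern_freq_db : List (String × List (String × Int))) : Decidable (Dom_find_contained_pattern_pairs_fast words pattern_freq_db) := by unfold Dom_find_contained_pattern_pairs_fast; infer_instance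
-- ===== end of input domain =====

-- B replaces the all-pairs issubset scan by an inverted index (pattern → set of words
-- containing it) and posting-list intersection; same output, same order (objective: alternative).

-- ===== PORT A =====
-- build_pattern_sets: {word: set(pattern_freq_db[word].keys()) for word in words}
-- (pattern_freq_db[word] raises KeyError for a missing key — excluded by Pre_; the port
--  uses Dict.empty as default there, which Pre_ makes unreachable)
def pv_build_pattern_sets (words : List String) (pattern_freq_db : List (String × List (String × Int))) : PySem.Dict String (PySem.Set String) :=
  words.foldl
    (fun d word => d.insert word (PySem.Set.ofList ((PySem.Dict.ofList ((PySem.Dict.ofList pattern_freq_db).getD word [])).keys)))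
    PySem.Dict.empty

def find_contained_pattern_pairs_fast (words : List String) (pattern_freq_db : List (String × List (String × Int))) : List (String × String) :=
  let pattern_sets := pv_build_pattern_sets words pattern_freq_db
  words.foldl
    (fun results a =>
      let set_a := pattern_sets.getD a PySem.Set.empty
      words.foldl
        (fun results b =>
          if a = b then results
          else if PySem.Set.issubset set_a (pattern_sets.getD b PySem.Set.empty) then results ++ [(a, b)]
          else results)
        results)
    []

-- ===== PORT B =====
-- port of Source B: inverted index + posting-list intersection; the `for p in <set>` loops are
-- folds over the Set's element list (their results are order-independent: a Dict only looked
-- up afterwards, and an intersection used only for membership)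
def find_contained_pattern_pairs_fast_alt (words : List String) (pattern_freq_db : List (String × List (String × Int))) : List (String × String) :=
  let pattern_sets := pv_build_pattern_sets words pattern_freq_db
  let all_words : PySem.Set String := PySem.Set.ofList words
  let index : PySem.Dict String (PySem.Set String) :=
    words.foldl
      (fun idx w =>
        (pattern_sets.getD w PySem.Set.empty).foldl
          (fun idx p => idx.modify p PySem.Set.empty (fun s => PySem.Set.add s w))
          idx)
      PySem.Dict.empty
  words.foldl
    (fun results a =>
      let candidates :=
        (pattern_sets.getD a PySem.Set.empty).foldl
          (fun c p => PySem.Set.inter c (index.getD p PySem.Set.empty))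
          all_words
      words.foldl
        (fun results b =>
          if b ≠ a ∧ b ∈ candidates then results ++ [(a, b)] else results)
        results)
    []

-- ===== PRECONDITION & SPEC =====
-- Pre_ excludes exactly the inputs on which Python A raises KeyError: a word of `words`
-- missing from pattern_freq_db.
def Pre_find_contained_pattern_pairs_fast (words : List String) (pattern_freq_db : List (String × List (String × Int))) : Prop :=
  ∀ w ∈ words, w ∈ pattern_freq_db.map Prod.fst
instance (words : List String) (pattern_freq_db : List (String × List (String × Int))) : Decidable (Pre_find_contained_pattern_pairs_fast words pattern_freq_db) := by unfold Pre_find_contained_pattern_pairs_fast; infer_instance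

def pvWitness_find_contained_pattern_pairs_fast : List String × (List (String × List (String × Int))) :=
  (["ab", "cd"], [("ab", [("p", 1)]), ("cd", [("p", 1), ("q", 2)])])

def Spec_find_contained_pattern_pairs_fast (words : List String) (pattern_freq_db : List (String × List (String × Int))) (out : List (String × String)) : Prop := out = find_contained_pattern_pairs_fast_alt words pattern_freq_db
instance (words : List String) (pattern_freq_db : List (String × List (String × Int))) (out : List (String × String)) : Decidable (Spec_find_contained_pattern_pairs_fast words pattern_freq_db out) := by unfold Spec_find_contained_pattern_pairs_fast; infer_instance

-- ===== CLAIM (what is proved, stated in full; the proofs are below) =====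
def Claim_equal_find_contained_pattern_pairs_fast : Prop := ∀ (words : List String) (pattern_freq_db : List (String × List (String × Int))), Dom_find_contained_pattern_pairs_fast words pattern_freq_db → Pre_find_contained_pattern_pairs_fast words pattern_freq_db → Spec_find_contained_pattern_pairs_fast words pattern_freq_db (find_contained_pattern_pairs_fast words pattern_freq_db)

-- ===== LEMMAS AND PROOFS =====

-- membership in the posting set built for one word w (inner index loop)
lemma pv_mem_inner_index (l : List String) (d : PySem.Dict String (PySem.Set String)) (w p b : String) :
    b ∈ (l.foldl (fun d q => d.modify q PySem.Set.empty (fun s => PySem.Set.add s w)) d).getD p PySem.Set.empty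
      ↔ b ∈ d.getD p PySem.Set.empty ∨ (p ∈ l ∧ b = w) := by
  induction l generalizing d with
  | nil => simp
  | cons q rest ih =>
    simp only [List.foldl_cons, ih, PySem.Dict.getD_modify, List.mem_cons]
    by_cases hpq : p = q
    · subst hpq
      simp only [if_true, PySem.Set.mem_add]
      tauto
    · simp only [if_neg hpq]
      tauto

-- membership in the full inverted index
lemma pv_mem_index (ws : List String) (P : String → PySem.Set String)
    (d : PySem.Dict String (PySem.Set String)) (p b : String) :
    b ∈ (ws.foldl (fun idx w => (P w).foldl (fun idx q => idx.modify q PySem.Set.empty (fun s => PySem.Set.add s w)) idx) d).getD p PySem.Set.empty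
      ↔ b ∈ d.getD p PySem.Set.empty ∨ ∃ w ∈ ws, p ∈ P w ∧ b = w := by
  induction ws generalizing d with
  | nil => simp
  | cons w rest ih =>
    simp only [List.foldl_cons, ih, pv_mem_inner_index, List.mem_cons]
    constructor
    · rintro ((h | ⟨hp, hb⟩) | ⟨v, hv, hp, hb⟩)
      · exact Or.inl h
      · exact Or.inr ⟨w, Or.inl rfl, hp, hb⟩
      · exact Or.inr ⟨v, Or.inr hv, hp, hb⟩
    · rintro (h | ⟨v, (hv | hv), hp, hb⟩)
      · exact Or.inl (Or.inl h)
      · exact Or.inl (Or.inr ⟨hv ▸ hp, hv ▸ hb⟩)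
      · exact Or.inr ⟨v, hv, hp, hb⟩

-- membership in a fold of intersections
lemma pv_mem_fold_inter (l : List String) (g : String → PySem.Set String)
    (init : PySem.Set String) (b : String) :
    b ∈ l.foldl (fun c p => PySem.Set.inter c (g p)) init ↔ b ∈ init ∧ ∀ p ∈ l, b ∈ g p := by
  induction l generalizing init with
  | nil => simp
  | cons p rest ih =>
    simp only [List.foldl_cons, ih, PySem.Set.mem_inter, List.mem_cons]
    constructor
    · rintro ⟨⟨hb, hg⟩, hall⟩
      exact ⟨hb, fun q hq => hq.elim (fun h => h ▸ hg) (hall q)⟩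
    · rintro ⟨hb, hall⟩
      exact ⟨⟨hb, hall p (Or.inl rfl)⟩, fun q hq => hall q (Or.inr hq)⟩

-- the candidate set of a equals the containment test, for b drawn from words
lemma pv_mem_candidates (words : List String) (P : String → PySem.Set String) (a b : String)
    (hb : b ∈ words) :
    b ∈ (P a).foldl
        (fun c p => PySem.Set.inter c
          ((words.foldl (fun idx w => (P w).foldl (fun idx q => idx.modify q PySem.Set.empty (fun s => PySem.Set.add s w)) idx) PySem.Dict.empty).getD p PySem.Set.empty))
        (PySem.Set.ofList words)
      ↔ PySem.Set.issubset (P a) (P b) = true := by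
  rw [pv_mem_fold_inter, PySem.Set.issubset_iff]
  constructor
  · rintro ⟨-, hall⟩ p hp
    rcases (pv_mem_index words P PySem.Dict.empty p b).1 (hall p hp) with h | ⟨w, _, hpw, rfl⟩
    · simp at h
    · exact hpw
  · intro hsub
    refine ⟨(PySem.Set.mem_ofList words b).2 hb, fun p hp => ?_⟩
    exact (pv_mem_index words P PySem.Dict.empty p b).2 (Or.inr ⟨b, hb, hsub p hp, rfl⟩)

-- ===== VERDICT (by name: the statement is the Claim_ definition above) =====
theorem find_contained_pattern_pairs_fast_spec : Claim_equal_find_contained_pattern_pairs_fast := by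
  intro words pattern_freq_db _ _
  unfold Spec_find_contained_pattern_pairs_fast
  unfold find_contained_pattern_pairs_fast find_contained_pattern_pairs_fast_alt
  apply PySem.List.foldl_congr_mem
  intro results a _
  apply PySem.List.foldl_congr_mem
  intro res b hb
  have hcand := pv_mem_candidates words
    (fun w => (pv_build_pattern_sets words pattern_freq_db).getD w PySem.Set.empty) a b hb
  by_cases hab : a = b
  · subst hab
    simp
  · have hba : b ≠ a := fun h => hab h.symm
    simp only [if_neg hab]
    by_cases hsub : PySem.Set.issubset
        ((pv_build_pattern_sets words pattern_freq_db).getD a PySem.Set.empty)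
        ((pv_build_pattern_sets words pattern_freq_db).getD b PySem.Set.empty) = true
    · rw [if_pos hsub, if_pos ⟨hba, hcand.2 hsub⟩]
    · rw [if_neg hsub, if_neg (fun h => hsub (hcand.1 h.2))]
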